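-- pv_equiv track=rewrite | github.com/trilinos/Trilinos | cmake/tribits/python_utils/GeneralScriptSupport.py | cleanBadPath
-- ===== SOURCE A (Python) =====
-- def isPathChar(char):
--   return (char.isalnum() or char == '/') and (not char == ' ')
--
-- def cleanBadPath(inputPath):
--   cleanPath = ""
--   for i in range(len(inputPath)-1, -1, -1):
--     char = inputPath[i]
--     if not isPathChar(char):
--       break
--     cleanPath = char + cleanPath
--   return cleanPath
-- ===== SOURCE B (Python) =====
-- def isPathChar(char):
--   return (char.isalnum() or char == '/') and (not char == ' ')
--
-- def cleanBadPath(inputPath):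
--   start = 0
--   for i, char in enumerate(inputPath):
--     if not isPathChar(char):
--       start = i + 1
--   return inputPath[start:]
-- ===== Notes on version B (the rewrite author's own statement) =====
-- stated objective: simpler
-- what changed: Replaces the backward scan that prepends characters one by one with a single forward pass that maintains the index after the last invalid character and slices the string once.
import Mathlib
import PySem

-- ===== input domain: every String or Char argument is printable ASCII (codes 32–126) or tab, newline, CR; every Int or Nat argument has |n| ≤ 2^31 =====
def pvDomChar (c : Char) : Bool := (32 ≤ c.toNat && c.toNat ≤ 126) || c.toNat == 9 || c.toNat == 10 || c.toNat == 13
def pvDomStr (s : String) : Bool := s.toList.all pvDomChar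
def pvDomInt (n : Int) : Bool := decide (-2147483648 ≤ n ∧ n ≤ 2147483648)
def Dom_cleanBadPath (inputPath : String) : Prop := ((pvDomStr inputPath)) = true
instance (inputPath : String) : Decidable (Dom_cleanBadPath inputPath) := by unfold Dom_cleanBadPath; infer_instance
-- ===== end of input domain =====

-- B differs from A by scanning forward once, tracking the index after the last invalid
-- character, and slicing once, instead of scanning backward and prepending characters.

-- ===== PORT A =====
-- isPathChar(char): (char.isalnum() or char == '/') and (not char == ' ')
def isPathCharL (c : Char) : Bool :=
  (PySem.Chars.isalnum c || c == '/') && !(c == ' ')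

-- the backward for-loop of A: iterates over the characters from the end (given here
-- already reversed), breaking at the first non-path character, prepending each kept char
def cleanLoopA : List Char → List Char → List Char
  | [], acc => acc
  | c :: rest, acc => if !(isPathCharL c) then acc else cleanLoopA rest (c :: acc)

def cleanBadPath (inputPath : String) : String :=
  String.ofList (cleanLoopA inputPath.toList.reverse [])

-- ===== PORT B =====
-- the forward enumerate loop of B: start := i+1 whenever char i is invalid
def bStart (l : List Char) : Int :=
  (PySem.List.enumerate l 0).foldl
    (fun st p => if !(isPathCharL p.2) then p.1 + 1 else st) 0

def cleanBadPath_alt (inputPath : String) : String :=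
  String.ofList (PySem.List.slice inputPath.toList (some (bStart inputPath.toList)) none)

-- ===== PRECONDITION & SPEC =====
def Spec_cleanBadPath (inputPath : String) (out : String) : Prop := out = cleanBadPath_alt inputPath
instance (inputPath : String) (out : String) : Decidable (Spec_cleanBadPath inputPath out) := by unfold Spec_cleanBadPath; infer_instance

-- ===== CLAIM (what is proved, stated in full; the proofs are below) =====
def Claim_equal_cleanBadPath : Prop := ∀ (inputPath : String), Dom_cleanBadPath inputPath → Spec_cleanBadPath inputPath (cleanBadPath inputPath)

-- ===== LEMMAS AND PROOFS =====

-- A's loop is takeWhile on the reversed list, re-reversed in front of the accumulator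
theorem cleanLoopA_eq (r acc : List Char) :
    cleanLoopA r acc = (r.takeWhile isPathCharL).reverse ++ acc := by
  induction r generalizing acc with
  | nil => simp [cleanLoopA]
  | cons c rest ih =>
    by_cases h : isPathCharL c
    · simp [cleanLoopA, h, ih]
    · simp [cleanLoopA, h]

-- B's start index equals length minus the trailing run of path characters
theorem bStart_eq (l : List Char) :
    bStart l = (l.length : Int) - (l.reverse.takeWhile isPathCharL).length := by
  induction l using List.reverseRecOn with
  | nil => simp [bStart]
  | append_singleton l c ih =>
    unfold bStart at ih ⊢
    rw [PySem.List.enumerate_append, List.foldl_append]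
    by_cases h : isPathCharL c
    · simp only [PySem.List.enumerate_cons, PySem.List.enumerate_nil, List.foldl_cons,
        List.foldl_nil, h, Bool.not_true, Bool.false_eq_true, if_false, ih,
        List.reverse_append, List.reverse_singleton, List.singleton_append,
        List.takeWhile_cons, if_true, List.length_cons, List.length_append]
      simp
    · simp only [PySem.List.enumerate_cons, PySem.List.enumerate_nil, List.foldl_cons,
        List.foldl_nil, h, Bool.not_false, if_true,
        List.reverse_append, List.reverse_singleton, List.singleton_append,
        List.takeWhile_cons, Bool.false_eq_true, if_false, List.length_nil,
        List.length_append, List.length_singleton]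
      push_cast
      ring

-- a suffix of l of length T equals drop (l.length - T)
theorem drop_eq_of_suffix {α : Type} {s l : List α} (h : s <:+ l) :
    l.drop (l.length - s.length) = s := by
  obtain ⟨t, rfl⟩ := h
  simp [List.length_append]

theorem cleanBadPath_eq_alt (inputPath : String) :
    cleanBadPath inputPath = cleanBadPath_alt inputPath := by
  unfold cleanBadPath cleanBadPath_alt
  set l := inputPath.toList with hl
  have hT : (l.reverse.takeWhile isPathCharL).length ≤ l.length := by
    have := (List.takeWhile_prefix (l := l.reverse) isPathCharL).length_le
    simpa using this
  rw [bStart_eq l, PySem.List.slice_from _ (by omega)]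
  have htn : ((l.length : Int) - ((l.reverse.takeWhile isPathCharL).length : Int)).toNat
      = l.length - (l.reverse.takeWhile isPathCharL).length := by omega
  rw [htn]
  congr 1
  rw [cleanLoopA_eq, List.append_nil]
  have hsuf : (l.reverse.takeWhile isPathCharL).reverse <:+ l := by
    have hpre : (l.reverse.takeWhile isPathCharL) <+: l.reverse := List.takeWhile_prefix _
    have := List.reverse_suffix.mpr hpre
    simpa using this
  have hd := drop_eq_of_suffix hsuf
  rw [List.length_reverse] at hd
  exact hd.symm

-- ===== VERDICT (by name: the statement is the Claim_ definition above) =====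
theorem cleanBadPath_spec : Claim_equal_cleanBadPath := by
  intro s _
  unfold Spec_cleanBadPath
  exact cleanBadPath_eq_alt s
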